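-- pv_equiv track=rewrite | github.com/vkiryukhin/vkbeautify-python | vkbeautify.py | _create_shift_arr
-- ===== SOURCE A (Python) =====
-- def _create_shift_arr(step):
--     shift = ['\n']
--     ix = 0
--     space = ' '*step if type(step) is int else step
--
--     while ix < 100:
--         shift.append(shift[ix]+space)
--         ix = ix + 1
--
--     return shift;
-- ===== SOURCE B (Python) =====
-- def _create_shift_arr(step):
--     space = ' '*step if type(step) is int else step
--     return ['\n' + space*i for i in range(101)]
-- ===== Notes on version B (the rewrite author's own statement) =====
-- stated objective: simpler
-- what changed: Replaces the while-loop with a dependent accumulator (each entry extends the previous list element shift[ix]) by a direct per-index closed form '\n' + space*i over range(101), so no running state is maintained.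
import Mathlib
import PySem

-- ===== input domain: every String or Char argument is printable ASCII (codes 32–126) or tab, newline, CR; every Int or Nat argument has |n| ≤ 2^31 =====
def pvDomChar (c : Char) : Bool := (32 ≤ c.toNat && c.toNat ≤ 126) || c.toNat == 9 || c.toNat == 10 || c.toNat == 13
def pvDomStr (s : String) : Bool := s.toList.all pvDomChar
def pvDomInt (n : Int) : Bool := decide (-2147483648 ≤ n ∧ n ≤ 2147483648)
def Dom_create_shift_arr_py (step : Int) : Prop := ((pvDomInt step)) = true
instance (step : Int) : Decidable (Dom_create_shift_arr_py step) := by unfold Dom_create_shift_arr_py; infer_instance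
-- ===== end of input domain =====

-- B replaces A's dependent-accumulator while-loop (each entry extends the previous
-- list element) by a direct per-index closed form '\n' + space*i over range(101): simpler, no running state.


-- ===== PORT A =====
-- space = ' '*step (step : Int here, so the type(step) is int branch always taken);
-- the while-loop appends shift[ix]+space; shift[ix] is always in range, so pyGetD's default "" is never used.
def create_shift_arr_py (step : Int) : List String :=
  let space : List Char := PySem.List.pyRepeat [' '] step
  (PySem.List.pyRange 0 100).foldl
    (fun shift ix =>
      shift ++ [String.ofList ((PySem.List.pyGetD shift ix "").toList ++ space)])
    [String.ofList ['\n']]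

-- ===== PORT B =====
def create_shift_arr_py_alt (step : Int) : List String :=
  let space : List Char := PySem.List.pyRepeat [' '] step
  (PySem.List.pyRange 0 101).map (fun i => String.ofList ('\n' :: PySem.List.pyRepeat space i))

-- ===== PRECONDITION & SPEC =====
def Spec_create_shift_arr_py (step : Int) (out : List String) : Prop := out = create_shift_arr_py_alt step
instance (step : Int) (out : List String) : Decidable (Spec_create_shift_arr_py step out) := by unfold Spec_create_shift_arr_py; infer_instance

-- ===== CLAIM (what is proved, stated in full; the proofs are below) =====
def Claim_equal_create_shift_arr_py : Prop := ∀ (step : Int), Dom_create_shift_arr_py step → Spec_create_shift_arr_py step (create_shift_arr_py step)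

-- ===== LEMMAS AND PROOFS =====

theorem pyRepeat_succ {α : Type} (xs : List α) (k : Nat) :
    PySem.List.pyRepeat xs ((k : Int) + 1) = PySem.List.pyRepeat xs (k : Int) ++ xs := by
  have h : ((k : Int) + 1).toNat = k + 1 := by omega
  simp [PySem.List.pyRepeat, h, List.replicate_succ', List.flatten_append]

-- Loop invariant: after k iterations, the list is the closed-form table of the first k+1 prefixes.
theorem loop_inv (space : List Char) (k : Nat) :
    (PySem.List.pyRange 0 (k : Int)).foldl
      (fun shift ix =>
        shift ++ [String.ofList ((PySem.List.pyGetD shift ix "").toList ++ space)])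
      [String.ofList ['\n']]
    = (PySem.List.pyRange 0 ((k : Int) + 1)).map
        (fun i => String.ofList ('\n' :: PySem.List.pyRepeat space i)) := by
  induction k with
  | zero =>
      have h1 : PySem.List.pyRange 0 1 = [(0:Int)] := by decide
      simp [h1, PySem.List.pyRepeat]
  | succ k ih =>
      have hk : (0 : Int) ≤ (k : Int) := by positivity
      have hsplit : PySem.List.pyRange 0 ((k : Int) + 1)
          = PySem.List.pyRange 0 (k : Int) ++ [(k : Int)] :=
        PySem.List.pyRange_one_succ_right hk
      have hcast : ((k + 1 : Nat) : Int) = (k : Int) + 1 := by push_cast; ring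
      rw [hcast, hsplit, List.foldl_append, ih]
      have hget : PySem.List.pyGetD
          ((PySem.List.pyRange 0 ((k : Int) + 1)).map
            (fun i => String.ofList ('\n' :: PySem.List.pyRepeat space i))) (k : Int) ""
          = String.ofList ('\n' :: PySem.List.pyRepeat space (k : Int)) :=
        PySem.List.pyGetD_map_pyRange_of_nonneg _ _ _ _ hk (by omega)
      have hsplit2 : PySem.List.pyRange 0 ((k : Int) + 1 + 1)
          = PySem.List.pyRange 0 ((k : Int) + 1) ++ [(k : Int) + 1] :=
        PySem.List.pyRange_one_succ_right (by omega)
      simp only [List.foldl_cons, List.foldl_nil, hget, hsplit2, List.map_append,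
        List.map_cons, List.map_nil]
      simp [String.toList_ofList, pyRepeat_succ]

-- ===== VERDICT (by name: the statement is the Claim_ definition above) =====
theorem create_shift_arr_py_spec : Claim_equal_create_shift_arr_py := by
  intro step _
  unfold Spec_create_shift_arr_py create_shift_arr_py create_shift_arr_py_alt
  have h := loop_inv (PySem.List.pyRepeat [' '] step) 100
  norm_num at h
  simpa using h
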